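-- pv_equiv track=rewrite | github.com/ogatetsu-0501/cdata | main.py | build_record_index
-- ===== SOURCE A (Python) =====
-- from typing import Dict, Optional, Any, List, Callable
--
-- def normalize_header_name(value: Any) -> str:
--     """
--     小学生にもわかる説明：
--       Excel の見出し文字から前後の余計な空白を取り除き、
--       同じ名前どうしを比べやすく整えます。
--     """
--     if value is None:
--         return ""
--     text = str(value)
--     return text.strip()
--
-- def build_record_index(data: List[List[Any]], columns: List[str]) -> Dict[str, Dict[str, Dict[str, str]]]:
--     """
--     小学生にもわかる説明：
--       表の1行目を見出しにして、指定された列の値をキーにした辞書を作ります。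
--       この辞書を使うと、同じ列を1行ずつ調べるより速く探せます。
--     """
--     # 返り値の入れ物を用意します
--     index: Dict[str, Dict[str, Dict[str, str]]] = {}
--     if not data:
--         return index
--
--     # 1行目は見出しなので、空白を取り除いた名前にそろえておきます
--     headers = [normalize_header_name(v) for v in data[0]]
--
--     for column in columns:
--         # 欲しい列が無い場合は飛ばします
--         if column not in headers:
--             continue
--         idx = headers.index(column)
--         col_dict: Dict[str, Dict[str, str]] = {}
--         for row in data[1:]:
--             # 行から品目番号などのキーを取り出します
--             if idx < len(row) and row[idx] is not None:
--                 key = str(row[idx])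
--                 # 行全体を {列名: 値} の辞書に変換します
--                 col_dict[key] = {h: (str(row[i]) if i < len(row) and row[i] is not None else "")
--                                  for i, h in enumerate(headers) if h}
--         index[column] = col_dict
--     return index
-- ===== SOURCE B (Python) =====
-- from typing import Any, Dict, List
--
--
-- def normalize_header_name(value: Any) -> str:
--     if value is None:
--         return ""
--     return str(value).strip()
--
--
-- def build_record_index(data: List[List[Any]], columns: List[str]) -> Dict[str, Dict[str, Dict[str, str]]]:
--     # B: row-major single pass.  Build a header->first-index map once, set up an
--     # empty dict per requested present column, then walk the rows ONCE, building
--     # each row's record dict once and inserting it into every column dict.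
--     index: Dict[str, Dict[str, Dict[str, str]]] = {}
--     if not data:
--         return index
--     headers = [normalize_header_name(v) for v in data[0]]
--     pos: Dict[str, int] = {}
--     for i, h in enumerate(headers):
--         if h not in pos:
--             pos[h] = i
--     for column in columns:
--         if column in pos:
--             index[column] = {}
--     targets = [(index[c], pos[c]) for c in index]
--     for row in data[1:]:
--         rec = {h: (str(row[i]) if i < len(row) and row[i] is not None else "")
--                for i, h in enumerate(headers) if h}
--         for col_dict, i in targets:
--             if i < len(row) and row[i] is not None:
--                 col_dict[str(row[i])] = rec
--     return index
-- ===== Notes on version B (the rewrite author's own statement) =====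
-- stated objective: faster
-- what changed: B swaps the loop nesting: instead of A's column-major pass that rescans headers and rebuilds every row's record dict for each column, B makes one row-major pass, building each row's record dict once and inserting it into all per-column dicts via precomputed (dict, position) targets.
import Mathlib
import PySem

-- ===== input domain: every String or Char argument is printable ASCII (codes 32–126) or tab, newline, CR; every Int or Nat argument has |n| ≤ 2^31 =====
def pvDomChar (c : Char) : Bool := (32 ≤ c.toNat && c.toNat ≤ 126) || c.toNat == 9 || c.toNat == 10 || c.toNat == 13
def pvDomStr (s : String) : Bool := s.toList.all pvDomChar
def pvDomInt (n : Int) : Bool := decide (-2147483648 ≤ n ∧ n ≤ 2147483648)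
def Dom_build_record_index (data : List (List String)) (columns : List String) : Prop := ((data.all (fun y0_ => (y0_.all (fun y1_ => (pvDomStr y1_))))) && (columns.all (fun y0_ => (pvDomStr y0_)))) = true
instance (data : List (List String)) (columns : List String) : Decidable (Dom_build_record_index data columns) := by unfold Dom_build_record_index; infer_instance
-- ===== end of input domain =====

-- B replaces A's column-major pass (rescan headers + rebuild every row dict per column) by one
-- row-major pass over precomputed (column-dict, position) targets; return values are proved equal.

-- ===== PORT A =====
-- normalize_header_name: arguments here are Strings (never None), so it is str.strip
def briNorm (v : String) : String := PySem.Str.strip v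

-- the row dict comprehension {h: (str(row[i]) if i < len(row) and row[i] is not None else "")
--                             for i, h in enumerate(headers) if h}  — identical source text in A and B
def briRowDict (headers row : List String) : PySem.Dict String String :=
  (PySem.List.enumerate headers 0).foldl
    (fun d p => if p.2 ≠ "" then
        d.insert p.2 (if p.1 < (row.length : Int) then PySem.List.pyGetD row p.1 "" else "")
      else d)
    PySem.Dict.empty

def build_record_index (data : List (List String)) (columns : List String) :
    List (String × List (String × List (String × String))) :=
  match data with
  | [] => []   -- 'if not data: return index' with index = {}
  | first :: rest =>
    let headers := first.map briNorm
    (columns.foldl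
      (fun (index : PySem.Dict String (PySem.Dict String (List (String × String)))) column =>
        match PySem.List.index? headers column with
        | none => index   -- 'if column not in headers: continue'
        | some idx =>
          let colDict := rest.foldl
            (fun cd (row : List String) =>
              if (idx : Int) < (row.length : Int) then
                cd.insert (PySem.List.pyGetD row (idx : Int) "") (briRowDict headers row).items
              else cd)
            PySem.Dict.empty
          index.insert column colDict)
      PySem.Dict.empty).items.map (fun p => (p.1, p.2.items))

-- ===== PORT B =====
def build_record_index_alt (data : List (List String)) (columns : List String) :
    List (String × List (String × List (String × String))) :=
  match data with
  | [] => []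
  | first :: rest =>
    let headers := first.map briNorm
    -- pos: header -> first index
    let pos : PySem.Dict String Int :=
      (PySem.List.enumerate headers 0).foldl
        (fun d p => if d.contains p.2 then d else d.insert p.2 p.1) PySem.Dict.empty
    -- 'for column in columns: if column in pos: index[column] = {}'
    let index0 : PySem.Dict String (PySem.Dict String (List (String × String))) :=
      columns.foldl
        (fun idx c => if pos.contains c then idx.insert c PySem.Dict.empty else idx)
        PySem.Dict.empty
    -- 'targets = [(index[c], pos[c]) for c in index]': Python keeps a REFERENCE to index[c];
    -- in-place mutation of that shared dict is modelled by Dict.modify at key c, so a target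
    -- carries the key c and pos[c] (c ∈ index guarantees c ∈ pos: the getD default is unused)
    let targets : List (String × Int) := index0.keys.map (fun c => (c, pos.getD c 0))
    -- 'for row in data[1:]: rec = {…}; for col_dict, i in targets: if i < len(row): col_dict[str(row[i])] = rec'
    let filled := rest.foldl
      (fun idx row =>
        let recd := (briRowDict headers row).items
        targets.foldl
          (fun idx t =>
            if t.2 < (row.length : Int) then
              idx.modify t.1 PySem.Dict.empty
                (fun cd => cd.insert (PySem.List.pyGetD row t.2 "") recd)
            else idx)
          idx)
      index0
    filled.items.map (fun p => (p.1, p.2.items))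

-- ===== PRECONDITION & SPEC =====
def Spec_build_record_index (data : List (List String)) (columns : List String) (out : List (String × List (String × List (String × String)))) : Prop := out = build_record_index_alt data columns
instance (data : List (List String)) (columns : List String) (out : List (String × List (String × List (String × String)))) : Decidable (Spec_build_record_index data columns out) := by unfold Spec_build_record_index; infer_instance

-- ===== CLAIM (what is proved, stated in full; the proofs are below) =====
def Claim_equal_build_record_index : Prop := ∀ (data : List (List String)) (columns : List String), Dom_build_record_index data columns → Spec_build_record_index data columns (build_record_index data columns)

-- ===== LEMMAS AND PROOFS =====

-- B's first-wins position map looks up to the FIRST index of a header, i.e. headers.index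
lemma posFold_get? (headers : List String) : ∀ (s : Int) (d : PySem.Dict String Int) (c : String),
    ((PySem.List.enumerate headers s).foldl
        (fun d p => if d.contains p.2 then d else d.insert p.2 p.1) d).get? c
      = if d.contains c then d.get? c
        else Option.map (fun n : Nat => s + (n : Int)) (PySem.List.index? headers c) := by
  induction headers with
  | nil =>
    intro s d c
    simp only [PySem.List.enumerate_nil, List.foldl_nil, PySem.List.index?_eq_idxOf?,
      List.idxOf?_nil, Option.map_none]
    by_cases hc : d.contains c = true
    · simp [hc]
    · have h0 : d.get? c = none := by
        rw [← Option.not_isSome_iff_eq_none]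
        rw [PySem.Dict.contains_eq_isSome_get?] at hc
        simpa using hc
      simp [hc, h0]
  | cons x t ih =>
    intro s d c
    rw [PySem.List.enumerate_cons]
    simp only [List.foldl_cons]
    by_cases hcx : c = x
    · subst hcx
      by_cases hx : d.contains c = true
      · rw [if_pos hx, ih, if_pos hx, if_pos hx]
      · rw [if_neg hx, ih, if_pos (PySem.Dict.contains_insert_self d c s), if_neg hx]
        rw [PySem.Dict.get?_insert_self, PySem.List.index?_cons_self]
        norm_num
    · have hb : (c == x) = false := by simp [hcx]
      have hix : PySem.List.index? (x :: t) c = (PySem.List.index? t c).map (· + 1) :=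
        PySem.List.index?_cons_of_ne t (Ne.symm hcx)
      by_cases hx : d.contains x = true
      · rw [if_pos hx, ih]
        by_cases hc : d.contains c = true
        · rw [if_pos hc, if_pos hc]
        · rw [if_neg hc, if_neg hc, hix, Option.map_map]
          congr 1
          funext n
          simp only [Function.comp]
          push_cast
          ring
      · rw [if_neg hx, ih]
        rw [PySem.Dict.contains_insert, hb, Bool.false_or,
          PySem.Dict.get?_insert_of_ne _ _ hcx]
        by_cases hc : d.contains c = true
        · rw [if_pos hc, if_pos hc]
        · rw [if_neg hc, if_neg hc, hix, Option.map_map]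
          congr 1
          funext n
          simp only [Function.comp]
          push_cast
          ring

lemma posFold_get?_empty (headers : List String) (c : String) :
    ((PySem.List.enumerate headers 0).foldl
        (fun d p => if d.contains p.2 then d else d.insert p.2 p.1)
        (PySem.Dict.empty : PySem.Dict String Int)).get? c
      = Option.map (fun n : Nat => (n : Int)) (PySem.List.index? headers c) := by
  rw [posFold_get?]
  simp [PySem.Dict.contains_empty]

-- a fold of guarded inserts whose value depends only on the key: lookup is pointwise
lemma insFold_getD {V : Type} (P : String → Prop) [DecidablePred P] (F : String → V) (e : V) :
    ∀ (cols : List String) (d : PySem.Dict String V) (c : String),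
      (cols.foldl (fun idx c => if P c then idx.insert c (F c) else idx) d).getD c e
        = if c ∈ cols ∧ P c then F c else d.getD c e := by
  intro cols
  induction cols with
  | nil => intro d c; simp
  | cons x cs ih =>
    intro d c
    simp only [List.foldl_cons, ih]
    by_cases hmem : c ∈ cs ∧ P c
    · rw [if_pos hmem, if_pos ⟨List.mem_cons_of_mem _ hmem.1, hmem.2⟩]
    · rw [if_neg hmem]
      by_cases hcx : c = x
      · subst hcx
        by_cases hp : P c
        · rw [if_pos hp, PySem.Dict.getD_insert_self, if_pos ⟨List.mem_cons_self, hp⟩]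
        · rw [if_neg hp, if_neg (by tauto)]
      · have hiff : (c ∈ x :: cs ∧ P c) ↔ (c ∈ cs ∧ P c) := by
          constructor
          · rintro ⟨h1, h2⟩
            rcases List.mem_cons.mp h1 with h | h
            · exact absurd h hcx
            · exact ⟨h, h2⟩
          · rintro ⟨h1, h2⟩; exact ⟨List.mem_cons_of_mem _ h1, h2⟩
        have hmem' : ¬(c ∈ x :: cs ∧ P c) := fun h => hmem (hiff.mp h)
        rw [if_neg hmem']
        by_cases hp : P x
        · rw [if_pos hp, PySem.Dict.getD_insert_of_ne _ _ _ hcx]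
        · rw [if_neg hp]

-- the keys laid down by such a fold: ordered dedup of the passing columns
lemma insFold_keys {V : Type} (P : String → Prop) [DecidablePred P] (F : String → V)
    (cols : List String) (d : PySem.Dict String V) :
    (cols.foldl (fun idx c => if P c then idx.insert c (F c) else idx) d).keys
      = PySem.Set.update d.keys (cols.filter (fun c => decide (P c))) := by
  rw [PySem.List.foldl_ite_eq_foldl_filter P
    (fun (idx : PySem.Dict String V) (c : String) => idx.insert c (F c)) cols d]
  simpa using PySem.Dict.keys_foldl_insert_key (cols.filter (fun c => decide (P c))) id
    (fun _ c => F c) d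

-- a sweep of guarded modifies over keys NOT containing c leaves c's value alone
lemma modFold_getD_notmem {V : Type} (Q : String → Prop) [DecidablePred Q]
    (f : String → V → V) (e : V) :
    ∀ (tk : List String) (d : PySem.Dict String V) (c : String), c ∉ tk →
      (tk.foldl (fun idx t => if Q t then idx.modify t e (f t) else idx) d).getD c e
        = d.getD c e := by
  intro tk
  induction tk with
  | nil => intro d c _; rfl
  | cons x xs ih =>
    intro d c hc
    simp only [List.foldl_cons]
    rw [ih _ _ (fun h => hc (List.mem_cons_of_mem _ h))]
    by_cases hq : Q x
    · rw [if_pos hq, PySem.Dict.getD_modify_of_ne _ _ _ (fun h => hc (by rw [h]; exact List.mem_cons_self))]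
    · rw [if_neg hq]

-- over distinct keys, one guarded-modify sweep acts pointwise
lemma modFold_getD {V : Type} (Q : String → Prop) [DecidablePred Q]
    (f : String → V → V) (e : V) :
    ∀ (tk : List String), tk.Nodup → ∀ (d : PySem.Dict String V) (c : String),
      (tk.foldl (fun idx t => if Q t then idx.modify t e (f t) else idx) d).getD c e
        = if c ∈ tk ∧ Q c then f c (d.getD c e) else d.getD c e := by
  intro tk
  induction tk with
  | nil => intro _ d c; simp
  | cons x xs ih =>
    intro hnd d c
    rcases List.nodup_cons.mp hnd with ⟨hx, hxs⟩
    simp only [List.foldl_cons]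
    by_cases hcx : c = x
    · subst hcx
      rw [modFold_getD_notmem Q f e xs _ c hx]
      by_cases hq : Q c
      · rw [if_pos hq, if_pos ⟨List.mem_cons_self, hq⟩, PySem.Dict.getD_modify_self]
      · rw [if_neg hq, if_neg (by tauto)]
    · rw [ih hxs]
      have hiff : (c ∈ x :: xs ∧ Q c) ↔ (c ∈ xs ∧ Q c) := by
        constructor
        · rintro ⟨h1, h2⟩
          rcases List.mem_cons.mp h1 with h | h
          · exact absurd h hcx
          · exact ⟨h, h2⟩
        · rintro ⟨h1, h2⟩; exact ⟨List.mem_cons_of_mem _ h1, h2⟩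
      by_cases hq : Q x
      · rw [if_pos hq, PySem.Dict.getD_modify_of_ne _ _ _ hcx]
        by_cases hm : c ∈ xs ∧ Q c
        · rw [if_pos hm, if_pos (hiff.mpr hm)]
        · have hm' : ¬(c ∈ x :: xs ∧ Q c) := fun h => hm (hiff.mp h)
          rw [if_neg hm, if_neg hm']
      · rw [if_neg hq]
        by_cases hm : c ∈ xs ∧ Q c
        · rw [if_pos hm, if_pos (hiff.mpr hm)]
        · have hm' : ¬(c ∈ x :: xs ∧ Q c) := fun h => hm (hiff.mp h)
          rw [if_neg hm, if_neg hm']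

-- a guarded-modify sweep over keys already present does not change the key list
lemma modFold_keys {V : Type} (Q : String → Prop) [DecidablePred Q]
    (f : String → V → V) (e : V) :
    ∀ (tk : List String) (d : PySem.Dict String V), (∀ t ∈ tk, t ∈ d.keys) →
      (tk.foldl (fun idx t => if Q t then idx.modify t e (f t) else idx) d).keys = d.keys := by
  intro tk
  induction tk with
  | nil => intro d _; rfl
  | cons x xs ih =>
    intro d hsub
    simp only [List.foldl_cons]
    by_cases hq : Q x
    · rw [if_pos hq]
      have hk : (d.modify x e (f x)).keys = d.keys := by
        rw [PySem.Dict.keys_modify, PySem.Dict.keys_insert_of_contains]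
        rw [PySem.Dict.contains_eq_decide_mem_keys]
        exact decide_eq_true (hsub x List.mem_cons_self)
      rw [ih _ (by rw [hk]; exact fun t ht => hsub t (List.mem_cons_of_mem _ ht)), hk]
    · rw [if_neg hq]
      exact ih _ (fun t ht => hsub t (List.mem_cons_of_mem _ ht))

-- the row-major double fold, read per key: each present column accumulates its own row fold
lemma rowsFold_getD {V : Type} (tk : List String) (hnd : tk.Nodup)
    (Q : String → List String → Prop) [∀ t r, Decidable (Q t r)]
    (g : String → List String → V → V) (e : V) :
    ∀ (rows : List (List String)) (d : PySem.Dict String V) (c : String),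
      (rows.foldl (fun idx row =>
          tk.foldl (fun idx t => if Q t row then idx.modify t e (g t row) else idx) idx) d).getD c e
        = if c ∈ tk then
            rows.foldl (fun cd (row : List String) => if Q c row then g c row cd else cd) (d.getD c e)
          else d.getD c e := by
  intro rows
  induction rows with
  | nil => intro d c; by_cases hm : c ∈ tk <;> simp [hm]
  | cons row rs ih =>
    intro d c
    simp only [List.foldl_cons, ih]
    by_cases hm : c ∈ tk
    · rw [if_pos hm, if_pos hm,
        modFold_getD (fun t => Q t row) (fun t => g t row) e tk hnd d c]
      by_cases hq : Q c row
      · rw [if_pos ⟨hm, hq⟩, if_pos hq]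
      · rw [if_neg (by tauto), if_neg hq]
    · rw [if_neg hm, if_neg hm,
        modFold_getD_notmem (fun t => Q t row) (fun t => g t row) e tk d c hm]

-- and it leaves the key list untouched when it only hits present keys
lemma rowsFold_keys {V : Type} (tk : List String)
    (Q : String → List String → Prop) [∀ t r, Decidable (Q t r)]
    (g : String → List String → V → V) (e : V) :
    ∀ (rows : List (List String)) (d : PySem.Dict String V), (∀ t ∈ tk, t ∈ d.keys) →
      (rows.foldl (fun idx row =>
          tk.foldl (fun idx t => if Q t row then idx.modify t e (g t row) else idx) idx) d).keys
        = d.keys := by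
  intro rows
  induction rows with
  | nil => intro d _; rfl
  | cons row rs ih =>
    intro d hsub
    simp only [List.foldl_cons]
    have hk := modFold_keys (fun t => Q t row) (fun t => g t row) e tk d hsub
    rw [ih _ (by rw [hk]; exact hsub), hk]

-- ===== VERDICT (by name: the statement is the Claim_ definition above) =====
theorem build_record_index_spec : Claim_equal_build_record_index := by
  intro data columns _
  unfold Spec_build_record_index
  cases data with
  | nil => rfl
  | cons first rest =>
    simp only [build_record_index, build_record_index_alt]
    set headers := first.map briNorm with hh
    set pos : PySem.Dict String Int :=
      (PySem.List.enumerate headers 0).foldl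
        (fun d p => if d.contains p.2 then d else d.insert p.2 p.1) PySem.Dict.empty with hpos
    set e : PySem.Dict String (List (String × String)) := PySem.Dict.empty with he
    set P : String → Bool := fun c => (PySem.List.index? headers c).isSome with hPdef
    set colA : Int → PySem.Dict String (List (String × String)) := fun i =>
      rest.foldl
        (fun cd (row : List String) =>
          if i < (row.length : Int) then
            cd.insert (PySem.List.pyGetD row i "") (briRowDict headers row).items
          else cd)
        e with hcolA
    set FA : String → PySem.Dict String (List (String × String)) := fun c =>
      colA (((PySem.List.index? headers c).getD 0 : Nat) : Int) with hFA
    clear_value headers pos e P colA FA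
    have hPB : ∀ c, pos.contains c = P c := by
      intro c
      rw [PySem.Dict.contains_eq_isSome_get?, hpos, posFold_get?_empty]
      simp only [hPdef, Option.isSome_map]
    have hip : ∀ c n, PySem.List.index? headers c = some n → pos.getD c 0 = (n : Int) := by
      intro c n h
      rw [PySem.Dict.getD_eq_get?_getD, hpos, posFold_get?_empty, h]
      rfl
    -- A's fold, rewritten with the guard explicit
    have hAfun : (fun (index : PySem.Dict String (PySem.Dict String (List (String × String)))) column =>
        match PySem.List.index? headers column with
        | none => index
        | some idx => index.insert column (rest.foldl
            (fun cd (row : List String) =>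
              if (idx : Int) < (row.length : Int) then
                cd.insert (PySem.List.pyGetD row (idx : Int) "") (briRowDict headers row).items
              else cd)
            e))
        = fun idx c => if P c = true then idx.insert c (FA c) else idx := by
      funext idx c
      rcases hn : PySem.List.index? headers c with _ | n
      · simp only [hPdef]
        rw [hn]
        rfl
      · simp only [hPdef, hFA, hcolA]
        rw [hn]
        rfl
    set index0 : PySem.Dict String (PySem.Dict String (List (String × String))) :=
      columns.foldl
        (fun idx c => if pos.contains c then idx.insert c e else idx)
        PySem.Dict.empty with hidx0
    set K := index0.keys with hK
    -- common key skeleton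
    have hKeq : K = PySem.Set.ofList (columns.filter (fun c => decide (P c = true))) := by
      rw [hK, hidx0, insFold_keys (fun c => pos.contains c = true) (fun _ => e)]
      rw [PySem.Dict.keys_empty]
      congr 1
      exact List.filter_congr (fun c _ => by rw [decide_eq_decide, hPB c])
    have hKnd : K.Nodup := by rw [hKeq]; exact PySem.Set.nodup_ofList _
    have hKmem : ∀ c, c ∈ K ↔ (c ∈ columns ∧ P c = true) := by
      intro c
      rw [hKeq, PySem.Set.mem_ofList, List.mem_filter, decide_eq_true_eq]
    have hidx0getD : ∀ c, index0.getD c e = e := by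
      intro c
      rw [hidx0, insFold_getD (fun c => pos.contains c = true) (fun _ => e) e]
      split
      · rfl
      · rw [he, PySem.Dict.getD_empty]
    -- the A-side dict
    set Afold := columns.foldl
      (fun (index : PySem.Dict String (PySem.Dict String (List (String × String)))) column =>
        match PySem.List.index? headers column with
        | none => index
        | some idx => index.insert column (rest.foldl
            (fun cd (row : List String) =>
              if (idx : Int) < (row.length : Int) then
                cd.insert (PySem.List.pyGetD row (idx : Int) "") (briRowDict headers row).items
              else cd)
            e))
      PySem.Dict.empty with hA
    have hAkeys : Afold.keys = K := by
      rw [hA, hAfun, insFold_keys (fun c => P c = true) FA, PySem.Dict.keys_empty, hKeq]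
      rfl
    have hAgetD : ∀ c, Afold.getD c e = if c ∈ columns ∧ P c = true then FA c else e := by
      intro c
      rw [hA, hAfun, insFold_getD (fun c => P c = true) FA e, PySem.Dict.getD_empty]
    -- the B-side dict
    set filled := rest.foldl
      (fun idx row =>
        (K.map (fun c => (c, pos.getD c 0))).foldl
          (fun idx t =>
            if t.2 < (row.length : Int) then
              idx.modify t.1 e
                (fun cd => cd.insert (PySem.List.pyGetD row t.2 "") (briRowDict headers row).items)
            else idx)
          idx)
      index0 with hfill
    have hfill2 : filled = rest.foldl
        (fun idx row =>
          K.foldl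
            (fun idx t =>
              if pos.getD t 0 < (row.length : Int) then
                idx.modify t e
                  (fun cd => cd.insert (PySem.List.pyGetD row (pos.getD t 0) "") (briRowDict headers row).items)
              else idx)
            idx)
        index0 := by
      rw [hfill]
      congr 1
      funext idx row
      rw [List.foldl_map]
    have hsub : ∀ t ∈ K, t ∈ index0.keys := fun t ht => by rw [← hK]; exact ht
    have hfillkeys : filled.keys = K := by
      rw [hfill2, rowsFold_keys K (fun t row => pos.getD t 0 < (row.length : Int))
        (fun t row cd => cd.insert (PySem.List.pyGetD row (pos.getD t 0) "") (briRowDict headers row).items)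
        e rest index0 hsub, hK]
    have hfillgetD : ∀ c ∈ K, filled.getD c e = FA c := by
      intro c hc
      rw [hfill2, rowsFold_getD K hKnd (fun t row => pos.getD t 0 < (row.length : Int))
        (fun t row cd => cd.insert (PySem.List.pyGetD row (pos.getD t 0) "") (briRowDict headers row).items)
        e rest index0 c, if_pos hc, hidx0getD]
      rcases (hKmem c).mp hc with ⟨_, hp⟩
      rcases hn : PySem.List.index? headers c with _ | n
      · simp only [hPdef, hn] at hp
        exact absurd hp (by simp)
      · have hpc := hip c n hn
        rw [hpc]
        simp only [hFA, hcolA, he]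
        rw [hn]
        rfl
    -- items agree, hence the mapped outputs agree
    have hitems : Afold.items = filled.items := by
      rw [PySem.Dict.items_eq_map_keys Afold (by rw [hAkeys]; exact hKnd) e,
        PySem.Dict.items_eq_map_keys filled (by rw [hfillkeys]; exact hKnd) e,
        hAkeys, hfillkeys]
      refine List.map_congr_left (fun c hc => ?_)
      rw [hAgetD c, if_pos ((hKmem c).mp hc), hfillgetD c hc]
    rw [hitems]
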